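-- pv_equiv track=rewrite | github.com/Celsogabrielf16/MC102 | lab05/lab05.py | separaString
-- ===== SOURCE A (Python) =====
-- def separaString(string: str, i: int, j: int) -> list():
--     stringList = list(string)
--     listaAntecede: list = [] # elemantos antecessores a i, se existirem
--     listaPrincipal: list = [] # elementos do conjunto [i, j]
--     listaSucede: list = [] # elementos sucessores a j, se existirem
--     indiceLista: int = 0 # Guarda o indice de cada caracter na lista
--     for caracter in stringList:
--         if indiceLista >= int(i) and indiceLista <= int(j):
--             listaPrincipal.append(caracter)
--         elif indiceLista < int(i) and int(i) > 0:
--             listaAntecede.append(caracter)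
--         elif indiceLista > int(j) and int(j) < len(string):
--             listaSucede.append(caracter)
--         indiceLista += 1
--     return [''.join(listaAntecede), ''.join(listaPrincipal), ''.join(listaSucede)]
-- ===== SOURCE B (Python) =====
-- def separaString(string: str, i: int, j: int) -> list:
--     # Clamp the inclusive range [i, j] to valid slice bounds:
--     # the start is at least 0, the stop is at least the start.
--     start = max(i, 0)
--     stop = max(j + 1, start)
--     return [string[:start], string[start:stop], string[stop:]]
-- ===== Notes on version B (the rewrite author's own statement) =====
-- stated objective: idiomatic
-- what changed: Replaced the character-by-character loop with three accumulator lists by range normalization (start = max(i,0), stop = max(j+1,start)) followed by three direct string slices.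
import Mathlib
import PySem

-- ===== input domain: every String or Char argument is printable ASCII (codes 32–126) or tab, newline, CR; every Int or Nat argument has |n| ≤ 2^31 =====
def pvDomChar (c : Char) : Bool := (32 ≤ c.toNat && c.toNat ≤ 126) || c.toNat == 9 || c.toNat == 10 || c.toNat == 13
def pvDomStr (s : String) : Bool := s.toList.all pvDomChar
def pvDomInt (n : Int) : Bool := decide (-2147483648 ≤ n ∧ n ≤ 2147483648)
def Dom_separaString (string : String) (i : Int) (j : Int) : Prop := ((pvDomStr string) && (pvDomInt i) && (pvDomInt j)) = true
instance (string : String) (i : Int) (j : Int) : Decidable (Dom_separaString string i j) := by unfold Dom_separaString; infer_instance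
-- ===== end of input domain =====

-- B replaces A's indexed character loop (three accumulator lists) by range normalization and three string slices (idiomatic, same cost).

-- ===== PORT A =====
-- one loop step: the branches of A's for-loop, in order, plus the index increment
def sepStep (i j L : Int) (st : List Char × List Char × List Char × Int) (c : Char) :
    List Char × List Char × List Char × Int :=
  match st with
  | (la, lp, ls, idx) =>
    if idx ≥ i ∧ idx ≤ j then (la, lp ++ [c], ls, idx + 1)
    else if idx < i ∧ i > 0 then (la ++ [c], lp, ls, idx + 1)
    else if idx > j ∧ j < L then (la, lp, ls ++ [c], idx + 1)
    else (la, lp, ls, idx + 1)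

def separaString (string : String) (i : Int) (j : Int) : List String :=
  match string.toList.foldl (sepStep i j (string.toList.length : Int)) ([], [], [], 0) with
  | (la, lp, ls, _) => [String.ofList la, String.ofList lp, String.ofList ls]

-- ===== PORT B =====
def separaString_alt (string : String) (i : Int) (j : Int) : List String :=
  let start := max i 0
  let stop := max (j + 1) start
  [String.ofList (PySem.List.slice string.toList none (some start)),
   String.ofList (PySem.List.slice string.toList (some start) (some stop)),
   String.ofList (PySem.List.slice string.toList (some stop) none)]

-- ===== PRECONDITION & SPEC =====
def Spec_separaString (string : String) (i : Int) (j : Int) (out : List String) : Prop := out = separaString_alt string i j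
instance (string : String) (i : Int) (j : Int) (out : List String) : Decidable (Spec_separaString string i j out) := by unfold Spec_separaString; infer_instance

-- ===== CLAIM (what is proved, stated in full; the proofs are below) =====
def Claim_equal_separaString : Prop := ∀ (string : String) (i : Int) (j : Int), Dom_separaString string i j → Spec_separaString string i j (separaString string i j)

-- ===== LEMMAS AND PROOFS =====

-- A's loop, started at index n with accumulators (a,p,s), appends clamped take/drop segments
lemma sepFold (i j : Int) (L : Nat) :
    ∀ (l : List Char) (n : Int) (a p s : List Char), 0 ≤ n → n + l.length ≤ (L : Int) →
    l.foldl (sepStep i j (L : Int)) (a, p, s, n) =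
      (a ++ l.take (i - n).toNat,
       p ++ (l.take (j + 1 - n).toNat).drop (i - n).toNat,
       s ++ l.drop (max i (j + 1) - n).toNat,
       n + l.length) := by
  intro l
  induction l with
  | nil => intro n a p s _ _; simp
  | cons c rest ih =>
    intro n a p s hn hL
    simp only [List.length_cons] at hL
    push_cast at hL
    simp only [List.foldl_cons, sepStep]
    by_cases h1 : n ≥ i ∧ n ≤ j
    · rw [if_pos h1]
      rw [ih (n + 1) a (p ++ [c]) s (by omega) (by omega)]
      have e1 : (i - n).toNat = 0 := by omega
      have e1' : (i - (n + 1)).toNat = 0 := by omega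
      have e2 : (j + 1 - n).toNat = (j + 1 - (n + 1)).toNat + 1 := by omega
      have e3 : (max i (j + 1) - n).toNat = (max i (j + 1) - (n + 1)).toNat + 1 := by omega
      simp [e1, e1', e2, e3]
      omega
    · rw [if_neg h1]
      by_cases h2 : n < i ∧ i > 0
      · rw [if_pos h2]
        rw [ih (n + 1) (a ++ [c]) p s (by omega) (by omega)]
        have e1 : (i - n).toNat = (i - (n + 1)).toNat + 1 := by omega
        have e3 : (max i (j + 1) - n).toNat = (max i (j + 1) - (n + 1)).toNat + 1 := by omega
        by_cases hj : j + 1 ≤ n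
        · have e2 : (j + 1 - n).toNat = 0 := by omega
          simp [e1, e2, e3]
          exact ⟨by omega, by omega⟩
        · have e2 : (j + 1 - n).toNat = (j + 1 - (n + 1)).toNat + 1 := by omega
          simp [e1, e2, e3]
          omega
      · rw [if_neg h2]
        have h3 : n > j ∧ j < (L : Int) := by
          constructor <;> omega
        rw [if_pos h3]
        rw [ih (n + 1) a p (s ++ [c]) (by omega) (by omega)]
        have e1 : (i - n).toNat = 0 := by omega
        have e1' : (i - (n + 1)).toNat = 0 := by omega
        have e2 : (j + 1 - n).toNat = 0 := by omega
        have e3 : (max i (j + 1) - n).toNat = 0 := by omega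
        have e3' : (max i (j + 1) - (n + 1)).toNat = 0 := by omega
        simp [e1, e1', e2, e3, e3']
        exact ⟨Or.inl (by omega), by omega⟩

-- ===== VERDICT (by name: the statement is the Claim_ definition above) =====
theorem separaString_spec : Claim_equal_separaString := by
  intro string i j _
  show _ = _
  unfold separaString separaString_alt
  simp only []
  rw [sepFold i j string.toList.length string.toList 0 [] [] [] le_rfl (by simp)]
  rw [PySem.List.slice_to _ (le_max_right i 0),
      PySem.List.slice_toNat _ (le_max_right i 0) (le_trans (le_max_right i 0) (le_max_right (j + 1) (max i 0))),
      PySem.List.slice_from _ (le_trans (le_max_right i 0) (le_max_right (j + 1) (max i 0)))]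
  simp only [sub_zero, List.nil_append, List.drop_take]
  have a1 : i.toNat = (max i 0).toNat := by omega
  have a2 : (j + 1).toNat - (max i 0).toNat = (max (j + 1) (max i 0)).toNat - (max i 0).toNat := by omega
  have a3 : (max i (j + 1)).toNat = (max (j + 1) (max i 0)).toNat := by omega
  rw [a1, a2, a3]
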